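-- pv_equiv track=rewrite | github.com/Nooralwachi/sticks_cutting.py | sticks.py | stick_cutting1
-- ===== SOURCE A (Python) =====
-- def stick_cutting1(sticks):
--     result = []
--     sticks = sorted(sticks)
--     while (sticks):
--         m = sticks[0]
--         result.append(len(sticks))
--         new_sticks =[]
--         for item in sticks[1:]:
--             if item -m !=0:
--                 new_sticks.append(item-m)
--         sticks = new_sticks
--     return result
-- ===== SOURCE B (Python) =====
-- def stick_cutting1(sticks):
--     s = sorted(sticks)
--     n = len(s)
--     result = []
--     i = 0
--     while i < n:
--         result.append(n - i)
--         v = s[i]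
--         i += 1
--         while i < n and s[i] == v:
--             i += 1
--     return result
-- ===== Notes on version B (the rewrite author's own statement) =====
-- stated objective: faster
-- what changed: Instead of repeatedly rebuilding the list (subtracting the minimum and filtering) per round, B sorts once and makes a single index sweep over the sorted list, emitting the suffix count n-i at the start of each run of equal values.
import Mathlib
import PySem

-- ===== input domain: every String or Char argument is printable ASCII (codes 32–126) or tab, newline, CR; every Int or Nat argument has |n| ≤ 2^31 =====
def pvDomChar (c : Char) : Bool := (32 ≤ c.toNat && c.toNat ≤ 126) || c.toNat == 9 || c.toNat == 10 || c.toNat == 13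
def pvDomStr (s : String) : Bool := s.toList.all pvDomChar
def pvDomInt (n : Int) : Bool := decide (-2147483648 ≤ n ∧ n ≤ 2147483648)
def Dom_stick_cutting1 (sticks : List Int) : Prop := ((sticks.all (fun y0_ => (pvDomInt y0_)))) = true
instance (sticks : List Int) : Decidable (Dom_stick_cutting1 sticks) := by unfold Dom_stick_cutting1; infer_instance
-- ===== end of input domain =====

-- B replaces A's quadratic round-by-round rebuild (subtract min, filter) with one sort and a single
-- index sweep over the sorted list, emitting the suffix count at the start of each run of equal values.


-- ===== PORT A =====
-- termination helper for the while loop: the rebuilt list is at least one shorter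
theorem pvALoopDec (m : Int) (rest : List Int) :
    (rest.foldl (fun acc item => if item - m ≠ 0 then acc ++ [item - m] else acc)
      ([] : List Int)).length < rest.length + 1 := by
  rw [PySem.List.foldl_append_ite (fun item => item - m ≠ 0) (fun item => item - m)]
  simpa using Nat.lt_succ_of_le (le_trans (List.length_filter_le _ _) (le_refl _))

-- while sticks: …  (result is the accumulator, sticks the loop state)
def stickALoop (result : List Int) (sticks : List Int) : List Int :=
  match sticks with
  | [] => result
  | m :: rest =>
    let new_sticks :=
      rest.foldl (fun acc item => if item - m ≠ 0 then acc ++ [item - m] else acc) []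
    stickALoop (result ++ [((rest.length : Int) + 1)]) new_sticks
termination_by sticks.length
decreasing_by simpa using pvALoopDec m rest

def stick_cutting1 (sticks : List Int) : List Int :=
  stickALoop [] (PySem.List.sorted sticks (fun x => x) false)

-- ===== PORT B =====
-- inner while: skip over the run of values equal to v
def stickBSkip (s : List Int) (v : Int) (i : Nat) : Nat :=
  if h : i < s.length then
    if s[i] = v then stickBSkip s v (i + 1) else i
  else i
termination_by s.length - i

theorem stickBSkip_ge (s : List Int) (v : Int) (i : Nat) : i ≤ stickBSkip s v i := by
  fun_induction stickBSkip with
  | case1 => omega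
  | case2 => omega
  | case3 => omega

-- outer while over the index i
def stickBLoop (s : List Int) (result : List Int) (i : Nat) : List Int :=
  if h : i < s.length then
    stickBLoop s (result ++ [(s.length : Int) - (i : Int)]) (stickBSkip s s[i] (i + 1))
  else result
termination_by s.length - i
decreasing_by have := stickBSkip_ge s s[i] (i + 1); omega

def stick_cutting1_alt (sticks : List Int) : List Int :=
  stickBLoop (PySem.List.sorted sticks (fun x => x) false) [] 0

-- ===== PRECONDITION & SPEC =====
def Spec_stick_cutting1 (sticks : List Int) (out : List Int) : Prop := out = stick_cutting1_alt sticks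
instance (sticks : List Int) (out : List Int) : Decidable (Spec_stick_cutting1 sticks out) := by unfold Spec_stick_cutting1; infer_instance

-- ===== CLAIM (what is proved, stated in full; the proofs are below) =====
def Claim_equal_stick_cutting1 : Prop := ∀ (sticks : List Int), Dom_stick_cutting1 sticks → Spec_stick_cutting1 sticks (stick_cutting1 sticks)

-- ===== LEMMAS AND PROOFS =====

-- canonical form: one count per run of equal values in a sorted list
def runCounts : List Int → List Int
  | [] => []
  | v :: rest => ((rest.length : Int) + 1) :: runCounts (rest.dropWhile (· == v))
termination_by s => s.length
decreasing_by simpa using Nat.lt_succ_of_le (List.length_dropWhile_le _ _)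

-- A's rebuilt list, in closed form
theorem stickA_new_sticks (m : Int) (rest : List Int) :
    rest.foldl (fun acc item => if item - m ≠ 0 then acc ++ [item - m] else acc) ([] : List Int)
      = (rest.filter (fun x => decide (x - m ≠ 0))).map (fun x => x - m) := by
  simpa using PySem.List.foldl_append_ite (fun item => item - m ≠ 0) (fun item => item - m) rest []

-- translating every stick by the same amount does not change A's loop output
theorem stickALoop_map_sub (c : Int) (t : List Int) (res : List Int) :
    stickALoop res (t.map (fun x => x - c)) = stickALoop res t := by
  cases t with
  | nil => rfl
  | cons a t' =>
    rw [List.map_cons, stickALoop, stickALoop]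
    simp only [stickA_new_sticks, List.filter_map, List.map_map, List.length_map]
    congr 2
    · funext x
      simp only [Function.comp_apply]
      ring
    · apply List.filter_congr
      intro x _
      simp only [Function.comp_apply]
      congr 1
      apply propext
      constructor <;> intro h <;> omega

-- in a sorted list whose elements all dominate m, filtering out m is dropping the leading run of m
theorem filter_ne_eq_dropWhile (m : Int) (t : List Int)
    (hs : t.Pairwise (· ≤ ·)) (hm : ∀ x ∈ t, m ≤ x) :
    t.filter (fun x => decide (x - m ≠ 0)) = t.dropWhile (· == m) := by
  induction t with
  | nil => rfl
  | cons a t' ih =>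
    by_cases ha : a = m
    · subst ha
      simp only [List.filter_cons, List.dropWhile_cons]
      simp only [sub_self, ne_eq, not_true_eq_false, decide_false, BEq.rfl, if_true]
      exact ih hs.of_cons (fun x hx => hm x (List.mem_cons_of_mem _ hx))
    · have hma : m < a := lt_of_le_of_ne (hm a (List.mem_cons_self)) (Ne.symm ha)
      simp only [List.filter_cons, List.dropWhile_cons]
      have h1 : (decide (a - m ≠ 0)) = true := by simp; omega
      have h2 : (a == m) = false := by simpa using ha
      rw [h1, h2]
      simp only [if_true, Bool.false_eq_true, if_false, List.cons.injEq, true_and]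
      rw [List.filter_eq_self.mpr]
      intro x hx
      have := (List.pairwise_cons.mp hs).1 x hx
      simp; omega

-- A's loop on a sorted list produces the run counts
theorem stickALoop_sorted (n : Nat) (s : List Int) (hn : s.length ≤ n)
    (hs : s.Pairwise (· ≤ ·)) (res : List Int) :
    stickALoop res s = res ++ runCounts s := by
  induction n generalizing s res with
  | zero =>
    have : s = [] := List.eq_nil_of_length_eq_zero (Nat.le_zero.mp hn)
    subst this; simp [stickALoop, runCounts]
  | succ n ih =>
    cases s with
    | nil => simp [stickALoop, runCounts]
    | cons m rest =>
      have hmin : ∀ x ∈ rest, m ≤ x := (List.pairwise_cons.mp hs).1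
      have hrest : rest.Pairwise (· ≤ ·) := (List.pairwise_cons.mp hs).2
      rw [stickALoop]
      simp only [stickA_new_sticks]
      rw [filter_ne_eq_dropWhile m rest hrest hmin]
      rw [stickALoop_map_sub]
      rw [ih _ (by
            have := List.length_dropWhile_le (· == m) rest
            simpa using le_trans this (Nat.lt_succ_iff.mp (Nat.lt_of_lt_of_le (by simp) hn)))
          (hrest.sublist (List.dropWhile_sublist _))]
      rw [runCounts]
      simp

-- skipping the run by index is dropping the run from the suffix
theorem drop_stickBSkip (s : List Int) (v : Int) (i : Nat) :
    s.drop (stickBSkip s v i) = (s.drop i).dropWhile (· == v) := by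
  fun_induction stickBSkip with
  | case1 i h heq ih =>
    rw [ih, List.drop_eq_getElem_cons h, List.dropWhile_cons]
    simp [heq]
  | case2 i h hne =>
    rw [List.drop_eq_getElem_cons h, List.dropWhile_cons]
    simp [hne]
  | case3 i h =>
    have : s.length ≤ i := Nat.le_of_not_lt h
    simp [List.drop_eq_nil_of_le this]

-- B's loop produces the run counts of the remaining suffix
theorem stickBLoop_eq (s : List Int) (i : Nat) (res : List Int) :
    stickBLoop s res i = res ++ runCounts (s.drop i) := by
  fun_induction stickBLoop with
  | case1 res i h ih =>
    rw [ih, List.drop_eq_getElem_cons h, runCounts, drop_stickBSkip]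
    have hlen : ((s.drop (i + 1)).length : Int) + 1 = (s.length : Int) - (i : Int) := by
      rw [List.length_drop]; omega
    rw [hlen]
    simp
  | case2 res i h =>
    have : s.length ≤ i := Nat.le_of_not_lt h
    simp [List.drop_eq_nil_of_le this, runCounts]

-- ===== VERDICT (by name: the statement is the Claim_ definition above) =====
theorem stick_cutting1_spec : Claim_equal_stick_cutting1 := by
  intro sticks _
  unfold Spec_stick_cutting1 stick_cutting1 stick_cutting1_alt
  rw [stickALoop_sorted (PySem.List.sorted sticks (fun x => x) false).length _ le_rfl
        (by simpa using PySem.List.sorted_pairwise sticks (fun x => x)),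
      stickBLoop_eq]
  simp
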